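-- pv_equiv track=rewrite | github.com/MarlaWindman/Homework_1 | main.py | item_price
-- ===== SOURCE A (Python) =====
-- def item_price(probuct):
--     sum = []
--     item = {"apple":4,"banna":2,"breed":3,"shirt":13,"pants":12,"stuffy":8,"cup":6}
--     for items in probuct:
--         if items not in item:
--             return None
--         else:
--             sum.append(item[items])
--     return sum
-- ===== SOURCE B (Python) =====
-- def item_price(probuct):
--     item = {"apple": 4, "banna": 2, "breed": 3, "shirt": 13, "pants": 12, "stuffy": 8, "cup": 6}
--     if all(x in item for x in probuct):
--         return [item[x] for x in probuct]
--     return None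
-- ===== Notes on version B (the rewrite author's own statement) =====
-- stated objective: idiomatic
-- what changed: Replaces the single early-returning accumulation loop with a validate-all membership pass followed by a separate list-comprehension build pass.
import Mathlib
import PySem

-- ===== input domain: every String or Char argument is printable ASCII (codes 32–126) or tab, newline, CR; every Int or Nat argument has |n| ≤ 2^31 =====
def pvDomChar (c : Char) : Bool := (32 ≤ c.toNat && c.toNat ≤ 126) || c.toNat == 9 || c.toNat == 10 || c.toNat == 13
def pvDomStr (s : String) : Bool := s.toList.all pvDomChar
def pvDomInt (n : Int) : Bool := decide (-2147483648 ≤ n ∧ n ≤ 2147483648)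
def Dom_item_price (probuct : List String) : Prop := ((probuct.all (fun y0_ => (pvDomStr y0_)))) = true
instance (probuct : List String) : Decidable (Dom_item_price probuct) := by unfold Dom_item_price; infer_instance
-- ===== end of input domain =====

-- B replaces A's early-returning accumulation loop with a validate-all pass plus a separate build pass (idiomatic; same cost).

-- ===== PORT A =====
-- the price dict literal shared by both Pythons
def priceTable : PySem.Dict String Int :=
  PySem.Dict.ofList [("apple", 4), ("banna", 2), ("breed", 3), ("shirt", 13), ("pants", 12), ("stuffy", 8), ("cup", 6)]

-- A's loop: accumulate prices, return None as soon as a name is missing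
def itemPriceLoop (probuct : List String) (acc : List Int) : Option (List Int) :=
  match probuct with
  | [] => some acc
  | items :: rest =>
    match priceTable.get? items with
    | none => none                                  -- 'if items not in item: return None'
    | some v => itemPriceLoop rest (acc ++ [v])     -- 'sum.append(item[items])'

def item_price (probuct : List String) : Option (List Int) :=
  itemPriceLoop probuct []

-- ===== PORT B =====
def item_price_alt (probuct : List String) : Option (List Int) :=
  if probuct.all (fun x => (priceTable.get? x).isSome) then
    -- comprehension [item[x] for x in probuct]; the guard ensures every lookup succeeds, so getD's default is never used
    some (probuct.map (fun x => (priceTable.get? x).getD 0))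
  else
    none

-- ===== PRECONDITION & SPEC =====
def Spec_item_price (probuct : List String) (out : Option (List Int)) : Prop := out = item_price_alt probuct
instance (probuct : List String) (out : Option (List Int)) : Decidable (Spec_item_price probuct out) := by unfold Spec_item_price; infer_instance

-- ===== CLAIM (what is proved, stated in full; the proofs are below) =====
def Claim_equal_item_price : Prop := ∀ (probuct : List String), Dom_item_price probuct → Spec_item_price probuct (item_price probuct)

-- ===== LEMMAS AND PROOFS =====
theorem itemPriceLoop_eq (probuct : List String) (acc : List Int) :
    itemPriceLoop probuct acc =
      if probuct.all (fun x => (priceTable.get? x).isSome) then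
        some (acc ++ probuct.map (fun x => (priceTable.get? x).getD 0))
      else none := by
  induction probuct generalizing acc with
  | nil => simp [itemPriceLoop]
  | cons x rest ih =>
    simp only [itemPriceLoop, List.all_cons, List.map_cons]
    cases h : priceTable.get? x with
    | none => simp
    | some v => simp [ih]

-- ===== VERDICT (by name: the statement is the Claim_ definition above) =====
theorem item_price_spec : Claim_equal_item_price := by
  intro probuct _
  unfold Spec_item_price item_price item_price_alt
  rw [itemPriceLoop_eq]
  simp
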